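-- pv_equiv track=rewrite | github.com/sunmingtao/sample-code | python/projecteuler/p147.py | get_diagnal_length_list
-- ===== SOURCE A (Python) =====
-- def get_diagnal_length_list(m, n): # m >= n
--     diagnal_length_list = []
--     temp_list = []
--     for i in range(1, n):
--         diagnal_length_list.append(i * 2)
--         temp_list.append(i * 2)
--     for i in range(m - n):
--         diagnal_length_list.append(2 * n - 1)
--     diagnal_length_list.extend(temp_list[::-1])
--     return diagnal_length_list
-- ===== SOURCE B (Python) =====
-- def get_diagnal_length_list(m, n):  # m >= n
--     a = max(0, n - 1)
--     b = max(0, m - n)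
--     return [2 * (p + 1) if p < a
--             else (2 * n - 1 if p < a + b else 2 * (2 * a + b - p))
--             for p in range(2 * a + b)]
-- ===== Notes on version B (the rewrite author's own statement) =====
-- stated objective: alternative
-- what changed: Replaces A's build-store-reverse structure (a temp list plus a [::-1] slice appended at the end) with one position-indexed pass: each element of the result is computed directly from its index p via a three-way closed form over segment sizes a=max(0,n-1), b=max(0,m-n).
import Mathlib
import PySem

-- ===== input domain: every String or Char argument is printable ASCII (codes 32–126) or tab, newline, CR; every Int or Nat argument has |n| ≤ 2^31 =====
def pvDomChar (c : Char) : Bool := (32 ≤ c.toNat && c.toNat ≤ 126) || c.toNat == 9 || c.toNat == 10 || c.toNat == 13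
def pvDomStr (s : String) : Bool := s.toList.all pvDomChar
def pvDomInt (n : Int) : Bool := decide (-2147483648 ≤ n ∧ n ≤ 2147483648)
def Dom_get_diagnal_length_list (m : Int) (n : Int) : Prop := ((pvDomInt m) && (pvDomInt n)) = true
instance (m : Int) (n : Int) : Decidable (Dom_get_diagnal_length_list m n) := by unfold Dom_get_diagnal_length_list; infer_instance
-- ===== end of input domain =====

-- B replaces A's build-store-reverse structure (temp list + [::-1] slice) with a single
-- position-indexed pass computing each element from its index; same cost, alternative structure.


-- ===== PORT A =====
-- literal transliteration: two append loops building (diagnal_length_list, temp_list),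
-- a constant-append loop, then extend with temp_list[::-1] (PySem slice?, exact for s[::-1]).
def get_diagnal_length_list (m : Int) (n : Int) : List Int :=
  let s := (PySem.List.pyRange 1 n 1).foldl
    (fun (st : List Int × List Int) i => (st.1 ++ [i * 2], st.2 ++ [i * 2])) ([], [])
  let d := (PySem.List.pyRange 0 (m - n) 1).foldl
    (fun (l : List Int) _ => l ++ [2 * n - 1]) s.1
  d ++ (PySem.List.slice? s.2 none none (-1)).getD []

-- ===== PORT B =====
-- literal transliteration of Source B: one comprehension over range(2*a+b), three-way branch on the index.
def get_diagnal_length_list_alt (m : Int) (n : Int) : List Int :=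
  let a := max 0 (n - 1)
  let b := max 0 (m - n)
  (PySem.List.pyRange 0 (2 * a + b) 1).map
    (fun p => if p < a then 2 * (p + 1)
              else if p < a + b then 2 * n - 1
              else 2 * (2 * a + b - p))

-- ===== PRECONDITION & SPEC =====
def Spec_get_diagnal_length_list (m : Int) (n : Int) (out : List Int) : Prop := out = get_diagnal_length_list_alt m n
instance (m : Int) (n : Int) (out : List Int) : Decidable (Spec_get_diagnal_length_list m n out) := by unfold Spec_get_diagnal_length_list; infer_instance

-- ===== CLAIM (what is proved, stated in full; the proofs are below) =====
def Claim_equal_get_diagnal_length_list : Prop := ∀ (m : Int) (n : Int), Dom_get_diagnal_length_list m n → Spec_get_diagnal_length_list m n (get_diagnal_length_list m n)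

-- ===== LEMMAS AND PROOFS =====

-- the pair loop of A appends i*2 to both components
theorem pv_foldl_pair (xs : List Int) (l1 l2 : List Int) :
    xs.foldl (fun (st : List Int × List Int) i => (st.1 ++ [i * 2], st.2 ++ [i * 2])) (l1, l2)
      = (l1 ++ xs.map (· * 2), l2 ++ xs.map (· * 2)) := by
  induction xs generalizing l1 l2 with
  | nil => simp
  | cons x xs ih => simp [List.foldl, ih]

-- the constant-append loop of A is init ++ replicate
theorem pv_foldl_const (xs : List Int) (c : Int) (init : List Int) :
    xs.foldl (fun (l : List Int) _ => l ++ [c]) init = init ++ List.replicate xs.length c := by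
  induction xs generalizing init with
  | nil => simp
  | cons x xs ih => rw [List.foldl_cons, ih]; simp [List.replicate_succ]

-- the common segment description
def pvSeg (n : Int) (A B : ℕ) : List Int :=
  (List.range A).map (fun k : ℕ => 2 * ((k : Int) + 1))
    ++ List.replicate B (2 * n - 1)
    ++ ((List.range A).map (fun k : ℕ => 2 * ((k : Int) + 1))).reverse

-- A's first loop maps i*2 over range(1, n)
theorem pv_asc (n : Int) :
    (PySem.List.pyRange 1 n 1).map (· * 2)
      = (List.range (n - 1).toNat).map (fun k : ℕ => 2 * ((k : Int) + 1)) := by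
  rw [PySem.List.pyRange_one, List.map_map]
  refine List.map_congr_left (fun k _ => ?_)
  simp only [Function.comp_apply]
  ring

theorem pv_a_eq (m n : Int) :
    get_diagnal_length_list m n = pvSeg n (n - 1).toNat (m - n).toNat := by
  unfold get_diagnal_length_list
  simp only [pv_foldl_pair, pv_foldl_const, PySem.List.slice?_none_none_neg_one,
    Option.getD_some, List.nil_append, PySem.List.length_pyRange_one, pv_asc]
  unfold pvSeg
  have h : (m - n - 0).toNat = (m - n).toNat := by omega
  rw [h]

theorem pv_b_eq (m n : Int) :
    get_diagnal_length_list_alt m n = pvSeg n (n - 1).toNat (m - n).toNat := by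
  unfold get_diagnal_length_list_alt pvSeg
  set A := (n - 1).toNat with hA
  set B := (m - n).toNat with hB
  have ha : max 0 (n - 1) = (A : Int) := by omega
  have hb : max 0 (m - n) = (B : Int) := by omega
  simp only [ha, hb]
  rw [PySem.List.pyRange_one_append 0 (A : Int) (2 * (A : Int) + B) (by positivity) (by omega)]
  rw [PySem.List.pyRange_one_append (A : Int) ((A : Int) + B) (2 * (A : Int) + B) (by omega) (by omega)]
  rw [List.map_append, List.map_append, ← List.append_assoc]
  congr 1
  congr 1
  · -- ascending part: every p in [0, A) takes the first branch
    rw [PySem.List.pyRange_one 0 (A : Int), List.map_map]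
    have h0 : ((A : Int) - 0).toNat = A := by omega
    rw [h0]
    refine List.map_congr_left (fun k hk => ?_)
    simp only [List.mem_range] at hk
    simp only [Function.comp_apply, zero_add]
    rw [if_pos (by exact_mod_cast hk)]
  · -- middle part: constant 2n-1
    rw [PySem.List.pyRange_one (A : Int) ((A : Int) + B), List.map_map]
    have h1 : ((A : Int) + B - A).toNat = B := by omega
    rw [h1]
    refine List.ext_getElem (by simp) (fun i hi1 hi2 => ?_)
    simp only [List.length_map, List.length_range] at hi1
    simp only [List.getElem_map, List.getElem_range, Function.comp_apply,
      List.getElem_replicate]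
    rw [if_neg (by omega), if_pos (by omega)]
  · -- descending tail: mirrored indices
    rw [PySem.List.pyRange_one ((A : Int) + B) (2 * (A : Int) + B), List.map_map]
    have h2 : (2 * (A : Int) + B - ((A : Int) + B)).toNat = A := by omega
    rw [h2]
    refine List.ext_getElem (by simp) (fun i hi1 hi2 => ?_)
    simp only [List.length_map, List.length_range] at hi1
    simp only [List.getElem_map, List.getElem_range, Function.comp_apply,
      List.getElem_reverse, List.length_map, List.length_range]
    rw [if_neg (by omega), if_neg (by omega)]
    omega

-- ===== VERDICT (by name: the statement is the Claim_ definition above) =====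
theorem get_diagnal_length_list_spec : Claim_equal_get_diagnal_length_list := by
  intro m n _
  unfold Spec_get_diagnal_length_list
  rw [pv_a_eq, pv_b_eq]
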